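-- pv_equiv track=rewrite | github.com/OCboy5/vpsweb | src/vpsweb/utils/text_processing.py | detect_stanza_structure
-- ===== SOURCE A (Python) =====
-- def detect_stanza_structure(source_text: str) -> str:
--     """Analyze poem text to determine stanza structure.
--
--     Detects stanza breaks based on empty lines. Only treats completely empty
--     lines (after stripping) as stanza breaks, ignoring indentation and whitespace.
--
--     Args:
--         source_text: The poem text to analyze
--
--     Returns:
--         Stanza structure description in format like:
--         - "2 stanzas of 9+9" (two stanzas of 9 lines each)
--         - "3 stanzas of 4+4+5" (three stanzas of specified lengths)
--         - "continuous" (no stanza breaks detected)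
--
--     Examples:
--         >>> detect_stanza_structure("Line 1\\nLine 2\\n\\nLine 3\\nLine 4")
--         '2 stanzas of 2+2'
--         >>> detect_stanza_structure("Single stanza poem")
--         'continuous'
--     """
--     lines = source_text.split("\n")
--     stanza_lengths = []
--     current_stanza_length = 0
--
--     for line in lines:
--         # Check if this is a completely empty line (after stripping)
--         if line.strip():
--             # Non-empty line - part of current stanza
--             current_stanza_length += 1
--         else:
--             # Empty line - stanza break
--             if current_stanza_length > 0:
--                 stanza_lengths.append(current_stanza_length)
--                 current_stanza_length = 0
--             # Skip consecutive empty lines - don't add empty stanzas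
--
--     # Add the last stanza if there are remaining lines
--     if current_stanza_length > 0:
--         stanza_lengths.append(current_stanza_length)
--
--     # Determine result format
--     if len(stanza_lengths) <= 1:
--         return "continuous"
--     else:
--         stanza_counts = "+".join(map(str, stanza_lengths))
--         return f"{len(stanza_lengths)} stanzas of {stanza_counts}"
-- ===== SOURCE B (Python) =====
-- def detect_stanza_structure(source_text: str) -> str:
--     """Staged marker-string approach: compress each line to one character
--     ('x' if non-blank, ' ' if blank), then let str.split() tokenize the
--     marker string on whitespace runs; each token's length is a stanza length."""
--     marks = "".join("x" if line.strip() else " " for line in source_text.split("\n"))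
--     stanza_lengths = [len(seg) for seg in marks.split()]
--     if len(stanza_lengths) <= 1:
--         return "continuous"
--     return f"{len(stanza_lengths)} stanzas of {'+'.join(map(str, stanza_lengths))}"
-- ===== Notes on version B (the rewrite author's own statement) =====
-- stated objective: alternative
-- what changed: Replaces A's per-line counter/flush state machine with a staged reduction: each line is compressed to one marker character ('x' non-blank, ' ' blank), the marker string is tokenized by str.split() on whitespace runs, and token lengths are the stanza lengths.
import Mathlib
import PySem

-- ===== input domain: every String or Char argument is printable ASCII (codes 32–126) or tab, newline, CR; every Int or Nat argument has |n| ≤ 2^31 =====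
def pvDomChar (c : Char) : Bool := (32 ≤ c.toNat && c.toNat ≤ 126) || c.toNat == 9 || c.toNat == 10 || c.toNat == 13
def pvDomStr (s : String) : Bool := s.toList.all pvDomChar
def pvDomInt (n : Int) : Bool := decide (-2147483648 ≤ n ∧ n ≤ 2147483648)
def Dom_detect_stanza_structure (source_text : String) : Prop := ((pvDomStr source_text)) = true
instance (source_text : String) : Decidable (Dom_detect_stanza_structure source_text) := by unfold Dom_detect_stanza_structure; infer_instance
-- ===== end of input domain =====

-- B replaces A's counter/flush state machine by a staged reduction: each line is compressed to
-- one marker character, the marker string is whitespace-tokenized, token lengths are the stanza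
-- lengths; objective: alternative (same cost).

-- ===== PORT A =====
-- Python truthiness of line.strip(): non-empty after stripping
def pvNonblank (line : String) : Bool := PySem.Str.strip line != ""

-- one step of A's for-loop over (stanza_lengths, current_stanza_length)
def pvAStep (acc : List Int × Int) (line : String) : List Int × Int :=
  if pvNonblank line then (acc.1, acc.2 + 1)
  else if acc.2 > 0 then (acc.1 ++ [acc.2], 0) else acc

def detect_stanza_structure (source_text : String) : String :=
  let lines := (PySem.Str.split? source_text "\n").getD []
  let st := lines.foldl pvAStep ([], 0)
  let stanza_lengths := if st.2 > 0 then st.1 ++ [st.2] else st.1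
  if stanza_lengths.length ≤ 1 then "continuous"
  else PySem.Int.toStr (stanza_lengths.length : Int) ++ " stanzas of " ++
       PySem.Str.join "+" (stanza_lengths.map PySem.Int.toStr)

-- ===== PORT B =====
def detect_stanza_structure_alt (source_text : String) : String :=
  let lines := (PySem.Str.split? source_text "\n").getD []
  -- marks = "".join("x" if line.strip() else " " for line in lines)
  let marks := PySem.Str.join "" (lines.map (fun line => if pvNonblank line then "x" else " "))
  -- stanza_lengths = [len(seg) for seg in marks.split()]
  let stanza_lengths := (PySem.Str.split₀ marks).map PySem.Str.len
  if stanza_lengths.length ≤ 1 then "continuous"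
  else PySem.Int.toStr (stanza_lengths.length : Int) ++ " stanzas of " ++
       PySem.Str.join "+" (stanza_lengths.map PySem.Int.toStr)

-- ===== PRECONDITION & SPEC =====
def Spec_detect_stanza_structure (source_text : String) (out : String) : Prop := out = detect_stanza_structure_alt source_text
instance (source_text : String) (out : String) : Decidable (Spec_detect_stanza_structure source_text out) := by unfold Spec_detect_stanza_structure; infer_instance

-- ===== CLAIM (what is proved, stated in full; the proofs are below) =====
def Claim_equal_detect_stanza_structure : Prop := ∀ (source_text : String), Dom_detect_stanza_structure source_text → Spec_detect_stanza_structure source_text (detect_stanza_structure source_text)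

-- ===== LEMMAS AND PROOFS =====

-- the stanza lengths A's loop would finally produce, started from counter cur
def pvPref (cur : Int) : List String → List Int
  | [] => if cur > 0 then [cur] else []
  | l :: ls => if pvNonblank l then pvPref (cur + 1) ls
               else if cur > 0 then cur :: pvPref 0 ls else pvPref 0 ls

-- A's fold, finalized, equals acc ++ pvPref cur ls
theorem pvA_foldl (ls : List String) : ∀ (acc : List Int) (cur : Int), 0 ≤ cur →
    (if (ls.foldl pvAStep (acc, cur)).2 > 0
       then (ls.foldl pvAStep (acc, cur)).1 ++ [(ls.foldl pvAStep (acc, cur)).2]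
       else (ls.foldl pvAStep (acc, cur)).1) = acc ++ pvPref cur ls := by
  induction ls with
  | nil =>
    intro acc cur _
    by_cases h : cur > 0 <;> simp [pvPref, h]
  | cons l ls ih =>
    intro acc cur hcur
    by_cases h : pvNonblank l
    · simpa [pvAStep, h, pvPref] using ih acc (cur + 1) (by omega)
    · by_cases hc : cur > 0
      · simpa [pvAStep, h, hc, pvPref] using ih (acc ++ [cur]) 0 (by omega)
      · have hz : cur = 0 := by omega
        subst hz
        simpa [pvAStep, h, pvPref] using ih acc 0 (by omega)

-- the marker character of a line
def pvMark (line : String) : Char := if pvNonblank line then 'x' else ' '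

theorem pvIsspace_mark (l : String) :
    PySem.Chars.isspace (pvMark l) = !pvNonblank l := by
  unfold pvMark
  by_cases h : pvNonblank l <;> simp [h] <;> decide

-- split₀.go on a marker list, measured by word lengths, computes pvPref
theorem pvGo_spec (ls : List String) : ∀ (cur : List Char) (acc : List (List Char)),
    (PySem.Chars.split₀.go (ls.map pvMark) cur acc).map (fun w => (w.length : Int)) =
      acc.reverse.map (fun w => (w.length : Int)) ++ pvPref (cur.length : Int) ls := by
  induction ls with
  | nil =>
    intro cur acc
    by_cases h : cur = [] <;>
      simp [PySem.Chars.split₀.go, h, pvPref, List.isEmpty_iff]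
  | cons l ls ih =>
    intro cur acc
    rw [List.map_cons, PySem.Chars.split₀.go, pvIsspace_mark]
    rcases Bool.eq_false_or_eq_true (pvNonblank l) with h | h
    · -- non-blank line (this case has h : pvNonblank l = true)
      rw [h]
      simp only [Bool.not_true]
      rw [if_neg (by simp)]
      rw [ih (pvMark l :: cur) acc]
      have hp : pvPref ((cur.length : Int)) (l :: ls) = pvPref ((cur.length : Int) + 1) ls := by
        rw [pvPref]; simp [h]
      simp [hp]
    · -- blank line (h : pvNonblank l = false)
      rw [h]
      rw [if_pos (by simp)]
      by_cases hc : cur = []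
      · subst hc
        rw [if_pos (by simp)]
        rw [ih [] acc]
        simp [pvPref, h]
      · rw [if_neg (by simpa [List.isEmpty_iff] using hc)]
        rw [ih [] (cur.reverse :: acc)]
        simp [pvPref, h, hc]

-- B's stanza-length list is pvPref 0 of the lines
theorem pvB_lengths (ls : List String) :
    ((PySem.Str.split₀ (PySem.Str.join "" (ls.map (fun line => if pvNonblank line then "x" else " ")))).map
        PySem.Str.len) = pvPref 0 ls := by
  have hmarks :
      (PySem.Str.join "" (ls.map (fun line => if pvNonblank line then "x" else " "))).toList
        = ls.map pvMark := by
    rw [PySem.Str.toList_join]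
    have : (ls.map (fun line => if pvNonblank line then "x" else " ")).map String.toList
        = (ls.map pvMark).map (fun c => [c]) := by
      simp only [List.map_map]
      refine List.map_congr_left ?_
      intro l _
      by_cases h : pvNonblank l <;> simp [pvMark, h]
    rw [this]
    simpa using PySem.Chars.join_nil_singletons (ls.map pvMark)
  unfold PySem.Str.split₀
  rw [hmarks]
  unfold PySem.Chars.split₀
  have := pvGo_spec ls [] []
  simp only [List.reverse_nil, List.map_nil, List.nil_append, List.length_nil, Nat.cast_zero] at this
  rw [List.map_map]
  have hfun : (PySem.Str.len ∘ String.ofList) = (fun w : List Char => (w.length : Int)) := by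
    funext w; simp [PySem.Str.len]
  rw [hfun, this]

-- ===== VERDICT (by name: the statement is the Claim_ definition above) =====
theorem detect_stanza_structure_spec : Claim_equal_detect_stanza_structure := by
  intro s _
  unfold Spec_detect_stanza_structure detect_stanza_structure detect_stanza_structure_alt
  simp only [pvB_lengths, pvA_foldl _ [] 0 (by omega), List.nil_append]
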